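-- pv_equiv track=rewrite | github.com/ucd-plse/mpi-error-prop | scripts/injection/analyze.py | pick_test
-- ===== SOURCE A (Python) =====
-- severity = [
--     "segfault",                     # 6
--     "floating point exception",     # 5
--     "timeout",                      # 4
--     "test failure",                 # 3
--     "test passes",                  # 2
--     "assert",                       # 1
--     "abort",
--     "all tests pass",
--     "dropping site",
--     "origin site",
--     "detected",
--     "test build failure",
-- ]
--
-- def pick_test(unfixed_test_results, fixed_test_results, unfixed_run_results):
--     """
--     Given a dictionary test_name -> set([test results]),
--     returns a test, if one exists, where the error code is not
--     detected in unfixed_test_results, but is detected in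
--     fixed_test_results.
--
--     Returns None if no test can be selected
--     """
--
--     if not fixed_test_results:
--         return (None, None)
--
--     # test_name -> most severe unfixed behavior
--     candidates = dict()
--
--     unfixed_behaviors = dict()
--
--     # sort for determinism
--     fixed_test_names = sorted(fixed_test_results.keys())
--
--     # Go through every test in fixed results
--     for fixed_test_name in fixed_test_names:
--         fixed_behavior = fixed_test_results[fixed_test_name]
--         # check to see if error code is detected in fixed version
--         if "detected" not in fixed_behavior:
--             continue
--
--         # If the run does not exist (file is missing), then behavior is timeout
--         if not unfixed_test_results and "all tests pass" not in unfixed_run_results: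
--             unfixed_behavior = set(["timeout"])
--         else:
--             unfixed_behavior = unfixed_test_results[fixed_test_name]
--
--         if "detected" in unfixed_behavior:
--             continue
--
--         # Save most severe unfixed behavior
--         most_severe = sorted(unfixed_behavior, key=lambda x: severity.index(x))
--
--         # Undetected in unfixed, and detected in fixed. Yay!
--         if most_severe:
--             candidates[fixed_test_name] = most_severe[0]
--
--     # sort test candidates by severity of most severe unfixed behavior per test
--     sorted_candidates = sorted(candidates.keys(),
--         key=lambda x: severity.index(candidates[x]))
--
--     # return the selected test where unfixed behavior is most severe
--     if len(candidates) == 0: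
--         return (None, None)
--     return (sorted_candidates[0], candidates[sorted_candidates[0]])
-- ===== SOURCE B (Python) =====
-- severity = [
--     "segfault",                     # 6
--     "floating point exception",     # 5
--     "timeout",                      # 4
--     "test failure",                 # 3
--     "test passes",                  # 2
--     "assert",                       # 1
--     "abort",
--     "all tests pass",
--     "dropping site",
--     "origin site",
--     "detected",
--     "test build failure",
-- ]
--
-- def pick_test(unfixed_test_results, fixed_test_results, unfixed_run_results):
--     """
--     Single pass with a running best: no candidates dict, no final sort.
--     best holds (test_name, behavior, severity_index); strict '<' keeps the
--     first test in sorted key order on severity ties.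
--     """
--     best = None
--     for name in sorted(fixed_test_results.keys()):
--         fixed_behavior = fixed_test_results[name]
--         if "detected" not in fixed_behavior:
--             continue
--         if not unfixed_test_results and "all tests pass" not in unfixed_run_results:
--             unfixed_behavior = set(["timeout"])
--         else:
--             unfixed_behavior = unfixed_test_results[name]
--         if "detected" in unfixed_behavior:
--             continue
--         if not unfixed_behavior:
--             continue
--         b = min(unfixed_behavior, key=severity.index)
--         i = severity.index(b)
--         if best is None or i < best[2]:
--             best = (name, b, i)
--     if best is None:
--         return (None, None)
--     return (best[0], best[1])
-- ===== Notes on version B (the rewrite author's own statement) =====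
-- stated objective: simpler
-- what changed: Replaced the candidates dict, the per-test sort of each behavior set and the final sort of all candidates by a single pass over the sorted test names that keeps a running (name, behavior, severity-index) best, using min(...) per test and a strict '<' update to preserve the first-in-sorted-order tie-break.
import Mathlib
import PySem

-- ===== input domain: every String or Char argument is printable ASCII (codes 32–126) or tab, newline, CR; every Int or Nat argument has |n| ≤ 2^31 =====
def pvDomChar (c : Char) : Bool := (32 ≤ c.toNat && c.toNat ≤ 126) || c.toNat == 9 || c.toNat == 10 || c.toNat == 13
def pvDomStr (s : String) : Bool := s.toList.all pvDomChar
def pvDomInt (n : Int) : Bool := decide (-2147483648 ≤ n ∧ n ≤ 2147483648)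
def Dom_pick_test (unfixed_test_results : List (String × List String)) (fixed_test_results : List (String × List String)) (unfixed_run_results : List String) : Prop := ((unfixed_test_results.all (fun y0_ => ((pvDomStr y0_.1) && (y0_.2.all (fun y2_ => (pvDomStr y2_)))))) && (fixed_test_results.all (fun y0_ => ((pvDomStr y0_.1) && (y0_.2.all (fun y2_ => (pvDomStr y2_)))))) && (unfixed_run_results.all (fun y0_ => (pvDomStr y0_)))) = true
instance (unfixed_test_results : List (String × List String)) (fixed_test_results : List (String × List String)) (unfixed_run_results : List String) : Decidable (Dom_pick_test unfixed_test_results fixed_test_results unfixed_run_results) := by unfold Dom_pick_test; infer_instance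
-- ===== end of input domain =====

-- B replaces A's candidates dict + two sorted() passes by one scan over the sorted test
-- names keeping a running (name, behavior, severity-index) best (objective: simpler).

-- ===== PORT A =====
-- the module-level `severity` list, shared by both programs
def pvSeverity : List String :=
  ["segfault", "floating point exception", "timeout", "test failure", "test passes",
   "assert", "abort", "all tests pass", "dropping site", "origin site", "detected",
   "test build failure"]

-- total form of severity.index(x); exact under Pre_ (ValueError inputs are excluded there)
def pvIdx (x : String) : Nat := (PySem.List.index? pvSeverity x).getD 0

def pick_test (unfixed_test_results : List (String × List String)) (fixed_test_results : List (String × List String)) (unfixed_run_results : List String) : Option String × Option String :=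
  let fd := PySem.Dict.ofList fixed_test_results
  let ud := PySem.Dict.ofList unfixed_test_results
  if fd.size = 0 then (none, none)
  else
    let fixed_test_names := PySem.List.sorted fd.keys (fun x => x) false
    let candidates := fixed_test_names.foldl (fun (c : PySem.Dict String String) name =>
      -- fd.get? name is some for every name in fd.keys; .getD [] is a harmless total form
      let fixed_behavior := (fd.get? name).getD []
      if ¬ ("detected" ∈ fixed_behavior) then c
      else
        -- ud.get? name = none is Python's KeyError: excluded by Pre_; .getD [] total form
        let unfixed_behavior : List String :=
          if ud.size = 0 ∧ ¬ ("all tests pass" ∈ unfixed_run_results) then ["timeout"]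
          else (ud.get? name).getD []
        if "detected" ∈ unfixed_behavior then c
        else
          let most_severe := PySem.List.sorted (PySem.Set.ofList unfixed_behavior) pvIdx false
          match most_severe with
          | [] => c
          | m :: _ => c.insert name m) PySem.Dict.empty
    let sorted_candidates := PySem.List.sorted candidates.keys (fun x => pvIdx ((candidates.get? x).getD "")) false
    if candidates.size = 0 then (none, none)
    else
      -- sorted_candidates[0]: nonempty whenever candidates is; headD "" is a harmless total form
      (some (sorted_candidates.headD ""), some ((candidates.get? (sorted_candidates.headD "")).getD ""))

-- ===== PORT B =====
def pick_test_alt (unfixed_test_results : List (String × List String)) (fixed_test_results : List (String × List String)) (unfixed_run_results : List String) : Option String × Option String :=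
  let fd := PySem.Dict.ofList fixed_test_results
  let ud := PySem.Dict.ofList unfixed_test_results
  let best := (PySem.List.sorted fd.keys (fun x => x) false).foldl
    (fun (best : Option (String × String × Nat)) name =>
      let fixed_behavior := (fd.get? name).getD []
      if ¬ ("detected" ∈ fixed_behavior) then best
      else
        let unfixed_behavior : List String :=
          if ud.size = 0 ∧ ¬ ("all tests pass" ∈ unfixed_run_results) then ["timeout"]
          else (ud.get? name).getD []
        if "detected" ∈ unfixed_behavior then best
        else
          match PySem.List.min? (PySem.Set.ofList unfixed_behavior) pvIdx with
          | none => best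
          | some b =>
            let i := pvIdx b
            match best with
            | none => some (name, b, i)
            | some t => if i < t.2.2 then some (name, b, i) else best) none
  match best with
  | none => (none, none)
  | some t => (some t.1, some t.2.1)

-- ===== PRECONDITION & SPEC =====
-- Pre_ excludes exactly the inputs where Python A raises: a KeyError when a test that is
-- "detected" in the fixed results is missing from the unfixed results (and the timeout
-- fallback does not apply), and a ValueError when an undetected unfixed behavior string
-- is not in the severity list.
def Pre_pick_test (unfixed_test_results : List (String × List String)) (fixed_test_results : List (String × List String)) (unfixed_run_results : List String) : Prop :=
  ∀ p ∈ (PySem.Dict.ofList fixed_test_results).items, "detected" ∈ p.2 →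
    ((PySem.Dict.ofList unfixed_test_results).size = 0 ∧ "all tests pass" ∉ unfixed_run_results) ∨
    (((PySem.Dict.ofList unfixed_test_results).get? p.1) ≠ none ∧
      ("detected" ∈ ((PySem.Dict.ofList unfixed_test_results).get? p.1).getD [] ∨
        ∀ s ∈ ((PySem.Dict.ofList unfixed_test_results).get? p.1).getD [], s ∈ pvSeverity))
instance (unfixed_test_results : List (String × List String)) (fixed_test_results : List (String × List String)) (unfixed_run_results : List String) : Decidable (Pre_pick_test unfixed_test_results fixed_test_results unfixed_run_results) := by unfold Pre_pick_test; infer_instance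

def pvWitness_pick_test : (List (String × List String)) × (List (String × List String)) × List String :=
  ([("t1", ["segfault"])], [("t1", ["detected"])], [])

def Spec_pick_test (unfixed_test_results : List (String × List String)) (fixed_test_results : List (String × List String)) (unfixed_run_results : List String) (out : Option String × Option String) : Prop := out = pick_test_alt unfixed_test_results fixed_test_results unfixed_run_results
instance (unfixed_test_results : List (String × List String)) (fixed_test_results : List (String × List String)) (unfixed_run_results : List String) (out : Option String × Option String) : Decidable (Spec_pick_test unfixed_test_results fixed_test_results unfixed_run_results out) := by unfold Spec_pick_test; infer_instance

-- ===== CLAIM (what is proved, stated in full; the proofs are below) =====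
def Claim_equal_pick_test : Prop := ∀ (unfixed_test_results : List (String × List String)) (fixed_test_results : List (String × List String)) (unfixed_run_results : List String), Dom_pick_test unfixed_test_results fixed_test_results unfixed_run_results → Pre_pick_test unfixed_test_results fixed_test_results unfixed_run_results → Spec_pick_test unfixed_test_results fixed_test_results unfixed_run_results (pick_test unfixed_test_results fixed_test_results unfixed_run_results)

-- ===== LEMMAS AND PROOFS =====

-- A's loop body and B's loop body, named for the proof (definitionally the port lambdas)
def pvAStep (unfixed_test_results : List (String × List String)) (fixed_test_results : List (String × List String)) (unfixed_run_results : List String) (c : PySem.Dict String String) (name : String) : PySem.Dict String String :=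
  let fd := PySem.Dict.ofList fixed_test_results
  let ud := PySem.Dict.ofList unfixed_test_results
  let fixed_behavior := (fd.get? name).getD []
  if ¬ ("detected" ∈ fixed_behavior) then c
  else
    let unfixed_behavior : List String :=
      if ud.size = 0 ∧ ¬ ("all tests pass" ∈ unfixed_run_results) then ["timeout"]
      else (ud.get? name).getD []
    if "detected" ∈ unfixed_behavior then c
    else
      match PySem.List.sorted (PySem.Set.ofList unfixed_behavior) pvIdx false with
      | [] => c
      | m :: _ => c.insert name m

def pvBStep (unfixed_test_results : List (String × List String)) (fixed_test_results : List (String × List String)) (unfixed_run_results : List String) (best : Option (String × String × Nat)) (name : String) : Option (String × String × Nat) :=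
  let fd := PySem.Dict.ofList fixed_test_results
  let ud := PySem.Dict.ofList unfixed_test_results
  let fixed_behavior := (fd.get? name).getD []
  if ¬ ("detected" ∈ fixed_behavior) then best
  else
    let unfixed_behavior : List String :=
      if ud.size = 0 ∧ ¬ ("all tests pass" ∈ unfixed_run_results) then ["timeout"]
      else (ud.get? name).getD []
    if "detected" ∈ unfixed_behavior then best
    else
      match PySem.List.min? (PySem.Set.ofList unfixed_behavior) pvIdx with
      | none => best
      | some b =>
        match best with
        | none => some (name, b, pvIdx b)
        | some t => if pvIdx b < t.2.2 then some (name, b, pvIdx b) else best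

-- the per-name qualification both loops share: the chosen behavior, if the name qualifies
def pvStep (unfixed_test_results : List (String × List String)) (fixed_test_results : List (String × List String)) (unfixed_run_results : List String) (name : String) : Option String :=
  let fd := PySem.Dict.ofList fixed_test_results
  let ud := PySem.Dict.ofList unfixed_test_results
  let fixed_behavior := (fd.get? name).getD []
  if ¬ ("detected" ∈ fixed_behavior) then none
  else
    let unfixed_behavior : List String :=
      if ud.size = 0 ∧ ¬ ("all tests pass" ∈ unfixed_run_results) then ["timeout"]
      else (ud.get? name).getD []
    if "detected" ∈ unfixed_behavior then none
    else (PySem.List.sorted (PySem.Set.ofList unfixed_behavior) pvIdx false).head?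

def pvPair (unfixed_test_results : List (String × List String)) (fixed_test_results : List (String × List String)) (unfixed_run_results : List String) (name : String) : Option (String × String) :=
  (pvStep unfixed_test_results fixed_test_results unfixed_run_results name).map (fun m => (name, m))

def pvCands (unfixed_test_results : List (String × List String)) (fixed_test_results : List (String × List String)) (unfixed_run_results : List String) : List (String × String) :=
  (PySem.List.sorted (PySem.Dict.ofList fixed_test_results).keys (fun x => x) false).filterMap
    (pvPair unfixed_test_results fixed_test_results unfixed_run_results)

def pvMinStep (acc : Option (String × String × Nat)) (p : String × String) : Option (String × String × Nat) :=
  match acc with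
  | none => some (p.1, p.2, pvIdx p.2)
  | some t => if pvIdx p.2 < t.2.2 then some (p.1, p.2, pvIdx p.2) else acc

theorem pv_min?_snoc {α κ : Type} [LinearOrder κ] (l : List α) (x : α) (key : α → κ) :
    PySem.List.min? (l ++ [x]) key =
      (match PySem.List.min? l key with
       | none => some x
       | some m => if key x < key m then some x else some m) := by
  simp only [PySem.List.min?, List.foldl_append, List.foldl]
  rfl

-- head of a stable sort = first element with minimal key (Python min)
theorem pv_head_sorted_eq_min? {α κ : Type} [LinearOrder κ] (l : List α) (key : α → κ) :
    (PySem.List.sorted l key false).head? = PySem.List.min? l key := by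
  induction l using List.reverseRecOn with
  | nil => rfl
  | append_singleton l x ih =>
    rw [pv_min?_snoc]
    rw [PySem.List.sorted_eq_foldl_insertBy, List.foldl_append, ← PySem.List.sorted_eq_foldl_insertBy] at *
    cases hs : PySem.List.sorted l key false with
    | nil =>
      rw [hs] at ih
      simp [List.foldl, PySem.List.insertBy, ← ih]
    | cons y ys =>
      rw [hs] at ih
      simp only [List.foldl, PySem.List.insertBy, ← ih]
      by_cases h : key x < key y <;> simp [h]

theorem pv_min?_map_aux {α β κ : Type} [LinearOrder κ] (l : List α) (f : α → β) (key : β → κ)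
    (o : Option α) :
    List.foldl (fun acc a =>
        match acc with
        | none => some (f a)
        | some m => if key (f a) < key m then some (f a) else some m) (o.map f) l =
      (List.foldl (fun acc a =>
        match acc with
        | none => some a
        | some m => if key (f a) < key (f m) then some a else some m) o l).map f := by
  induction l generalizing o with
  | nil => rfl
  | cons a t ih =>
    cases o with
    | none => simpa using ih (some a)
    | some m =>
      simp only [List.foldl, Option.map_some]
      by_cases h : key (f a) < key (f m) <;> simp only [h, if_true, if_false] <;>
        [exact ih (some a); exact ih (some m)]

-- min? over a mapped list
theorem pv_min?_map {α β κ : Type} [LinearOrder κ] (l : List α) (f : α → β) (key : β → κ) :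
    PySem.List.min? (l.map f) key = (PySem.List.min? l (fun x => key (f x))).map f := by
  unfold PySem.List.min?
  rw [List.foldl_map]
  simpa using pv_min?_map_aux l f key none

theorem pv_min?_congr_aux {α κ : Type} [LinearOrder κ] (l : List α) (k1 k2 : α → κ)
    (h : ∀ x ∈ l, k1 x = k2 x) (o : Option α) (ho : ∀ m, o = some m → k1 m = k2 m) :
    List.foldl (fun acc x =>
        match acc with
        | none => some x
        | some m => if k1 x < k1 m then some x else some m) o l =
      List.foldl (fun acc x =>
        match acc with
        | none => some x
        | some m => if k2 x < k2 m then some x else some m) o l := by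
  induction l generalizing o with
  | nil => rfl
  | cons a t ih =>
    have ha : k1 a = k2 a := h a (by simp)
    cases o with
    | none =>
      simp only [List.foldl]
      exact ih (fun x hx => h x (by simp [hx])) (some a) (by rintro x hx; cases hx; exact ha)
    | some m =>
      have hm : k1 m = k2 m := ho m rfl
      simp only [List.foldl, ha, hm]
      by_cases hc : k2 a < k2 m <;> simp only [hc, if_true, if_false]
      · exact ih (fun x hx => h x (by simp [hx])) (some a) (by rintro x hx; cases hx; exact ha)
      · exact ih (fun x hx => h x (by simp [hx])) (some m) (by rintro x hx; cases hx; exact hm)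

-- min? only looks at the key on members
theorem pv_min?_congr {α κ : Type} [LinearOrder κ] (l : List α) (k1 k2 : α → κ)
    (h : ∀ x ∈ l, k1 x = k2 x) :
    PySem.List.min? l k1 = PySem.List.min? l k2 := by
  unfold PySem.List.min?
  exact pv_min?_congr_aux l k1 k2 h none (by simp)

-- B's loop body, expressed through the shared qualification step
theorem pvBStep_eq (u f : List (String × List String)) (r : List String)
    (o : Option (String × String × Nat)) (n : String) :
    pvBStep u f r o n =
      (match pvPair u f r n with
       | none => o
       | some p => pvMinStep o p) := by
  unfold pvBStep pvPair pvStep pvMinStep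
  dsimp only
  rw [← pv_head_sorted_eq_min?]
  by_cases g1 : "detected" ∈ ((PySem.Dict.ofList f).get? n).getD []
  · simp only [g1, not_true, if_false]
    by_cases g2 : "detected" ∈
        (if (PySem.Dict.ofList u).size = 0 ∧ ¬ ("all tests pass" ∈ r) then ["timeout"]
         else ((PySem.Dict.ofList u).get? n).getD [])
    · simp [g2]
    · simp only [g2, if_false]
      cases hs : (PySem.List.sorted (PySem.Set.ofList
          (if (PySem.Dict.ofList u).size = 0 ∧ ¬ ("all tests pass" ∈ r) then ["timeout"]
           else ((PySem.Dict.ofList u).get? n).getD [])) pvIdx false).head? <;>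
        cases o <;> simp [hs]
  · simp [g1]

-- B's fold over the names = the running-min fold over the qualifying pairs
theorem pvB_fold (u f : List (String × List String)) (r : List String)
    (ns : List String) (o : Option (String × String × Nat)) :
    ns.foldl (pvBStep u f r) o = (ns.filterMap (pvPair u f r)).foldl pvMinStep o := by
  induction ns generalizing o with
  | nil => rfl
  | cons n ns ih =>
    rw [List.foldl_cons, pvBStep_eq]
    cases hp : pvPair u f r n <;> simp [hp, ih]

-- the running selection underlying Python's min(..., key=...)
def pvSel (o : Option (String × String)) (cs : List (String × String)) : Option (String × String) :=
  cs.foldl (fun acc x =>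
    match acc with
    | none => some x
    | some m => if pvIdx x.2 < pvIdx m.2 then some x else some m) o

theorem pvSel_snoc (o : Option (String × String)) (cs : List (String × String)) (x : String × String) :
    pvSel o (cs ++ [x]) =
      (match pvSel o cs with
       | none => some x
       | some m => if pvIdx x.2 < pvIdx m.2 then some x else some m) := by
  simp only [pvSel, List.foldl_append, List.foldl]

theorem pv_min?_eq_sel (cs : List (String × String)) :
    PySem.List.min? cs (fun p => pvIdx p.2) = pvSel none cs := by
  induction cs using List.reverseRecOn with
  | nil => rfl
  | append_singleton cs x ih =>
    rw [pv_min?_snoc, pvSel_snoc, ih]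
    cases pvSel none cs <;> rfl

-- the running-min fold is the selection enriched with the severity index
theorem pvMin_fold (cs : List (String × String)) (o : Option (String × String)) :
    cs.foldl pvMinStep (o.map (fun p => (p.1, p.2, pvIdx p.2))) =
      (pvSel o cs).map (fun p => (p.1, p.2, pvIdx p.2)) := by
  induction cs generalizing o with
  | nil => rfl
  | cons p cs ih =>
    simp only [pvSel, List.foldl_cons] at *
    cases o with
    | none => simpa [pvMinStep] using ih (some p)
    | some q =>
      simp only [Option.map_some, pvMinStep]
      by_cases h : pvIdx p.2 < pvIdx q.2 <;> simp only [h, if_true, if_false] <;>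
        [exact ih (some p); exact ih (some q)]

-- A's loop body, expressed through the shared qualification step
theorem pvAStep_eq (u f : List (String × List String)) (r : List String)
    (c : PySem.Dict String String) (n : String) :
    pvAStep u f r c n =
      (match pvPair u f r n with
       | none => c
       | some p => c.insert p.1 p.2) := by
  unfold pvAStep pvPair pvStep
  dsimp only
  by_cases g1 : "detected" ∈ ((PySem.Dict.ofList f).get? n).getD []
  · simp only [g1, not_true, if_false]
    by_cases g2 : "detected" ∈
        (if (PySem.Dict.ofList u).size = 0 ∧ ¬ ("all tests pass" ∈ r) then ["timeout"]
         else ((PySem.Dict.ofList u).get? n).getD [])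
    · simp [g2]
    · simp only [g2, if_false]
      cases hs : PySem.List.sorted (PySem.Set.ofList
          (if (PySem.Dict.ofList u).size = 0 ∧ ¬ ("all tests pass" ∈ r) then ["timeout"]
           else ((PySem.Dict.ofList u).get? n).getD [])) pvIdx false <;> simp
  · simp [g1]

-- A's dict-building fold appends one fresh pair per qualifying name
theorem pvA_fold (u f : List (String × List String)) (r : List String)
    (ns : List String) (c : PySem.Dict String String)
    (hnd : ns.Nodup) (hfresh : ∀ n ∈ ns, c.contains n = false) :
    ns.foldl (pvAStep u f r) c = ⟨c.items ++ ns.filterMap (pvPair u f r)⟩ := by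
  induction ns generalizing c with
  | nil => simp
  | cons n ns ih =>
    have hn : c.contains n = false := hfresh n (by simp)
    rw [List.foldl_cons, pvAStep_eq]
    cases hp : pvPair u f r n with
    | none =>
      rw [List.filterMap_cons, hp]
      exact ih c hnd.of_cons (fun x hx => hfresh x (by simp [hx]))
    | some p =>
      have hp1 : p.1 = n := by
        cases hq : pvStep u f r n <;> simp [pvPair, hq] at hp
        · cases hp; rfl
      have hins : c.insert p.1 p.2 = ⟨c.items ++ [(p.1, p.2)]⟩ := by
        rw [hp1]; simp [PySem.Dict.insert, hn]
      dsimp only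
      rw [hins, List.filterMap_cons, hp]
      rw [ih ⟨c.items ++ [(p.1, p.2)]⟩ hnd.of_cons ?_]
      · simp
      · intro x hx
        have hxn : x ≠ n := fun h => (List.nodup_cons.mp hnd).1 (h ▸ hx)
        have : c.contains x = false := hfresh x (by simp [hx])
        simp only [PySem.Dict.contains] at this ⊢
        simp only [List.any_append, this, hp1]
        simp [hxn.symm]

-- keys of the qualifying pairs form a sublist of the names
theorem pvCands_keys_sublist (u f : List (String × List String)) (r : List String)
    (ns : List String) :
    ((ns.filterMap (pvPair u f r)).map Prod.fst).Sublist ns := by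
  induction ns with
  | nil => simp
  | cons n ns ih =>
    rw [List.filterMap_cons]
    cases hp : pvPair u f r n with
    | none => exact ih.cons n
    | some p =>
      have hp1 : p.1 = n := by
        cases hq : pvStep u f r n <;> simp [pvPair, hq] at hp
        · cases hp; rfl
      simpa [hp1] using ih.cons₂ n

theorem pv_names_nodup (f : List (String × List String)) :
    (PySem.List.sorted (PySem.Dict.ofList f).keys (fun x => x) false).Nodup :=
  (PySem.List.sorted_perm _ _ _).nodup_iff.mpr (PySem.Dict.nodup_keys_ofList f)

-- A's whole pipeline, collapsed to min? over the qualifying pairs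
theorem pvA_eq (u f : List (String × List String)) (r : List String) :
    pick_test u f r =
      (match PySem.List.min? (pvCands u f r) (fun p => pvIdx p.2) with
       | none => (none, none)
       | some q => (some q.1, some q.2)) := by
  show (if (PySem.Dict.ofList f).size = 0 then ((none, none) : Option String × Option String)
        else
          let candidates := (PySem.List.sorted (PySem.Dict.ofList f).keys (fun x => x) false).foldl
            (pvAStep u f r) PySem.Dict.empty
          let sorted_candidates := PySem.List.sorted candidates.keys
            (fun x => pvIdx ((candidates.get? x).getD "")) false
          if candidates.size = 0 then (none, none)
          else (some (sorted_candidates.headD ""),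
                some ((candidates.get? (sorted_candidates.headD "")).getD ""))) = _
  have hfold : (PySem.List.sorted (PySem.Dict.ofList f).keys (fun x => x) false).foldl
      (pvAStep u f r) PySem.Dict.empty = ⟨pvCands u f r⟩ := by
    rw [pvA_fold u f r _ PySem.Dict.empty (pv_names_nodup f) (fun n _ => by simp)]
    simp [pvCands, PySem.Dict.empty]
  by_cases h0 : (PySem.Dict.ofList f).size = 0
  · have hitems : (PySem.Dict.ofList f).items = [] := by
      simpa [PySem.Dict.size, List.length_eq_zero_iff] using h0
    have hcs : pvCands u f r = [] := by
      simp [pvCands, PySem.Dict.keys, hitems, PySem.List.sorted]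
    rw [if_pos h0, hcs]
    rfl
  · rw [if_neg h0]
    dsimp only
    rw [hfold]
    have hknd : ((pvCands u f r).map Prod.fst).Nodup :=
      (pvCands_keys_sublist u f r _).nodup (pv_names_nodup f)
    by_cases hcs : pvCands u f r = []
    · rw [hcs]
      rfl
    · cases hq : PySem.List.min? (pvCands u f r) (fun p => pvIdx p.2) with
      | none => exact absurd ((PySem.List.min?_eq_none_iff _ _).mp hq) hcs
      | some q =>
        have hqmem : q ∈ pvCands u f r := PySem.List.min?_mem hq
        have hkeys : (PySem.Dict.mk (pvCands u f r)).keys = (pvCands u f r).map Prod.fst := rfl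
        have hget : ∀ p ∈ pvCands u f r, (PySem.Dict.mk (pvCands u f r)).get? p.1 = some p.2 := by
          intro p hp
          exact PySem.Dict.get?_of_mem_items _ (by simpa using hp) (by rw [hkeys]; exact hknd)
        have hhead : (PySem.List.sorted (PySem.Dict.mk (pvCands u f r)).keys
            (fun x => pvIdx (((PySem.Dict.mk (pvCands u f r)).get? x).getD "")) false).head? =
            some q.1 := by
          rw [pv_head_sorted_eq_min?, hkeys, pv_min?_map,
            pv_min?_congr (pvCands u f r) _ (fun p => pvIdx p.2)
              (fun p hp => by simp [hget p hp]), hq]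
          rfl
        have hheadD : (PySem.List.sorted (PySem.Dict.mk (pvCands u f r)).keys
            (fun x => pvIdx (((PySem.Dict.mk (pvCands u f r)).get? x).getD "")) false).headD "" =
            q.1 := by
          rw [List.headD_eq_head?_getD, hhead]
          rfl
        have hsz : ¬ (PySem.Dict.mk (pvCands u f r)).size = 0 := by
          simpa [PySem.Dict.size, List.length_eq_zero_iff] using hcs
        rw [if_neg hsz, hheadD, hget q hqmem]
        rfl

theorem pv_match_map (o : Option (String × String)) :
    (match o.map (fun p => (p.1, p.2, pvIdx p.2)) with
     | none => ((none : Option String), (none : Option String))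
     | some t => (some t.1, some t.2.1)) =
      (match o with
       | none => ((none : Option String), (none : Option String))
       | some q => (some q.1, some q.2)) := by
  cases o <;> rfl

-- B's whole pipeline, collapsed to the same expression
theorem pvB_eq (u f : List (String × List String)) (r : List String) :
    pick_test_alt u f r =
      (match PySem.List.min? (pvCands u f r) (fun p => pvIdx p.2) with
       | none => (none, none)
       | some q => (some q.1, some q.2)) := by
  show (match ((PySem.List.sorted (PySem.Dict.ofList f).keys (fun x => x) false).foldl (pvBStep u f r) none : Option (String × String × Nat)) with
        | none => ((none : Option String), (none : Option String))
        | some t => (some t.1, some t.2.1)) = _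
  rw [pvB_fold]
  have hm := pvMin_fold (pvCands u f r) none
  simp only [Option.map_none] at hm
  rw [show ((PySem.List.sorted (PySem.Dict.ofList f).keys (fun x => x) false).filterMap (pvPair u f r)) = pvCands u f r from rfl, hm, pv_match_map, pv_min?_eq_sel]

-- ===== VERDICT (by name: the statement is the Claim_ definition above) =====
theorem pick_test_spec : Claim_equal_pick_test := by
  intro u f r _ _
  unfold Spec_pick_test
  rw [pvA_eq, pvB_eq]
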